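-- pv_equiv track=rewrite | github.com/tchapeaux/advent-of-code-2021 | day19_ab.py | getAllRotations
-- ===== SOURCE A (Python) =====
-- def getAllRotations(scanner):
--     # returns the list of beacons in each of the possible combination
--     for coordX in (0, 1, 2):
--         for coordY in (0, 1, 2):
--             for coordZ in (0, 1, 2):
--                 if coordX == coordY or coordY == coordZ or coordX == coordZ:
--                     continue
--                 for invertX in [True, False]:
--                     for invertY in [True, False]:
--                         for invertZ in [True, False]:
--                             yield [
--                                 (
--                                     (-1 if invertX else 1) * c[coordX],
--                                     (-1 if invertY else 1) * c[coordY],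
--                                     (-1 if invertZ else 1) * c[coordZ],
--                                 )
--                                 for c in scanner
--                             ]
-- ===== SOURCE B (Python) =====
-- def getAllRotations(scanner):
--     # returns the list of beacons in each of the possible combination
--     def perms(xs):
--         # recursive permutation generation, lexicographic in position order
--         if len(xs) <= 1:
--             return [xs]
--         return [[xs[i]] + rest
--                 for i in range(len(xs))
--                 for rest in perms(xs[:i] + xs[i + 1:])]
--
--     for axes in perms([0, 1, 2]):
--         # permute each beacon once, then derive the 8 sign variants from it
--         permuted = [(c[axes[0]], c[axes[1]], c[axes[2]]) for c in scanner]
--         for m in range(8):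
--             sx = 1 if m & 4 else -1
--             sy = 1 if m & 2 else -1
--             sz = 1 if m & 1 else -1
--             yield [(sx * a, sy * b, sz * c) for (a, b, c) in permuted]
-- ===== Notes on version B (the rewrite author's own statement) =====
-- stated objective: alternative
-- what changed: Replaces A's six hard-coded nested loops by a recursive permutation generator over the axis indices and a two-stage pass: each axis permutation is applied to the scanner once, then the 8 sign variants are derived from that single permuted list via bit-indexed sign flips (m in range(8)), instead of recomputing every transform from the raw coordinates.
import Mathlib
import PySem

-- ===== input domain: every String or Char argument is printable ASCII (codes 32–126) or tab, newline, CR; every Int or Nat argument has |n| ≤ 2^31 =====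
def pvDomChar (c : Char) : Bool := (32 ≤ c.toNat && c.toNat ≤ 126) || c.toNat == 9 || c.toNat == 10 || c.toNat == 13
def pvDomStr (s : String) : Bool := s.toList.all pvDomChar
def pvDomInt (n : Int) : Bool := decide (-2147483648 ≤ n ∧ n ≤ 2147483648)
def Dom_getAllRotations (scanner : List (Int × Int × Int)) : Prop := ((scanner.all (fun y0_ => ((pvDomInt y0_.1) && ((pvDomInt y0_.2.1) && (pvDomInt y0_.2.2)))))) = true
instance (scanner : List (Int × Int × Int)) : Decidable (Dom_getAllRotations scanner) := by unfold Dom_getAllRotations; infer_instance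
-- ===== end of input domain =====

-- B replaces A's six nested loops by a recursive permutation generator plus a two-stage
-- pass: each axis permutation is applied to the scanner ONCE, and the 8 sign variants are
-- derived from that permuted list by bit-indexed sign flips (objective: alternative).

-- Python tuple indexing c[i] for a 3-tuple with i ∈ {0,1,2} (exact on that domain; both
-- sources only index tuples with 0, 1 or 2).
def pyIdx3 (c : Int × Int × Int) (i : Nat) : Int :=
  if i = 0 then c.1 else if i = 1 then c.2.1 else c.2.2

-- ===== PORT A =====
def getAllRotations (scanner : List (Int × Int × Int)) : List (List (Int × Int × Int)) :=
  ([0, 1, 2] : List Nat).flatMap fun coordX =>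
    ([0, 1, 2] : List Nat).flatMap fun coordY =>
      ([0, 1, 2] : List Nat).flatMap fun coordZ =>
        if coordX = coordY ∨ coordY = coordZ ∨ coordX = coordZ then []  -- continue
        else
          ([true, false]).flatMap fun invertX =>
            ([true, false]).flatMap fun invertY =>
              ([true, false]).map fun invertZ =>
                scanner.map fun c =>
                  ((if invertX then -1 else 1) * pyIdx3 c coordX,
                   (if invertY then -1 else 1) * pyIdx3 c coordY,
                   (if invertZ then -1 else 1) * pyIdx3 c coordZ)

-- ===== PORT B =====
-- Source B's recursive `perms`: indices are the nonnegative ints range(len(xs)), so Nat is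
-- exact; xs[:i] + xs[i+1:] = take i ++ drop (i+1), xs[i] = getD i 0 (i is in range).
-- The fuel argument (= len(xs), each recursive call drops one element) only makes the
-- same recursion structural; the computation is unchanged.
def permsFuel : Nat → List Nat → List (List Nat)
  | 0, xs => [xs]
  | n + 1, xs =>
    if xs.length ≤ 1 then [xs]
    else
      (List.range xs.length).flatMap fun i =>
        (permsFuel n (xs.take i ++ xs.drop (i + 1))).map fun rest => xs.getD i 0 :: rest

def permsB (xs : List Nat) : List (List Nat) := permsFuel xs.length xs

def getAllRotations_alt (scanner : List (Int × Int × Int)) : List (List (Int × Int × Int)) :=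
  (permsB [0, 1, 2]).flatMap fun axes =>
    let permuted := scanner.map fun c =>
      (pyIdx3 c (axes.getD 0 0), pyIdx3 c (axes.getD 1 0), pyIdx3 c (axes.getD 2 0))
    (PySem.List.pyRange 0 8 1).map fun m =>
      let sx : Int := if PySem.Int.band m 4 ≠ 0 then 1 else -1
      let sy : Int := if PySem.Int.band m 2 ≠ 0 then 1 else -1
      let sz : Int := if PySem.Int.band m 1 ≠ 0 then 1 else -1
      permuted.map fun p => (sx * p.1, sy * p.2.1, sz * p.2.2)

-- ===== PRECONDITION & SPEC =====
def Spec_getAllRotations (scanner : List (Int × Int × Int)) (out : List (List (Int × Int × Int))) : Prop := out = getAllRotations_alt scanner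
instance (scanner : List (Int × Int × Int)) (out : List (List (Int × Int × Int))) : Decidable (Spec_getAllRotations scanner out) := by unfold Spec_getAllRotations; infer_instance

-- ===== CLAIM =====
def Claim_equal_getAllRotations : Prop := ∀ (scanner : List (Int × Int × Int)), Dom_getAllRotations scanner → Spec_getAllRotations scanner (getAllRotations scanner)

-- ===== LEMMAS AND PROOFS =====
lemma permsB_three : permsB [0, 1, 2] =
    [[0, 1, 2], [0, 2, 1], [1, 0, 2], [1, 2, 0], [2, 0, 1], [2, 1, 0]] := by decide

-- ===== VERDICT =====
lemma pyRange8 : PySem.List.pyRange 0 8 1 = ([0, 1, 2, 3, 4, 5, 6, 7] : List Int) := by decide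

theorem getAllRotations_spec : Claim_equal_getAllRotations := by
  intro scanner _
  unfold Spec_getAllRotations getAllRotations getAllRotations_alt
  rw [permsB_three, pyRange8]
  simp [List.map_map, PySem.Int.band, pyIdx3, Function.comp, List.map_id']
  exact (List.map_id' scanner).symm
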